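-- pv_equiv track=rewrite | github.com/zhiyangxu-umass/scaffolding | allennlp/data/dataset_readers/ontonotes/consist_constit_reader.py | _convert_bio_into_set
-- ===== SOURCE A (Python) =====
-- from typing import Dict, List, Optional, Tuple, Set
--
-- def _convert_bio_into_set(tag_sequence: List[str]) -> Set[Tuple[int,int,str]]:
--     def remove_bio(tag):
--         return tag[2:] if tag.startswith('B-') or tag.startswith('I-') else tag
--     #self.calculate_span_size(tag_sequence)
--
--     spans = set()
--
--     start_span = 0
--     current_tag = tag_sequence[0]
--     for pos, tag in enumerate(tag_sequence[1:], 1):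
--         # width = pos - start_span
--         if tag.startswith("B-") or (tag == "O" and tag_sequence[pos - 1] != "O"):
--             end_span = pos - 1
--             spans.add((start_span,end_span,remove_bio(current_tag)))
--             start_span = pos
--             current_tag = tag
--             # width = pos - start_span
--         # elif width == self.max_span_width - 1:  # maximum allowed width
--         #     spans[pos][width] = remove_bio(current_tag)
--         #     start_span = pos + 1
--         #     if pos + 1 < len(tag_sequence):
--         #         current_tag = tag_sequence[pos + 1]
--     spans.add((start_span,len(tag_sequence)-1,remove_bio(tag_sequence[-1])))
--     return spans
-- ===== SOURCE B (Python) =====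
-- def _convert_bio_into_set(tag_sequence):
--     def remove_bio(tag):
--         return tag[2:] if tag.startswith('B-') or tag.startswith('I-') else tag
--     n = len(tag_sequence)
--     last_tag = tag_sequence[-1]
--     starts = [0] + [p for p in range(1, n)
--                     if tag_sequence[p].startswith('B-')
--                     or (tag_sequence[p] == 'O' and tag_sequence[p - 1] != 'O')]
--     spans = {(s, e - 1, remove_bio(tag_sequence[s])) for s, e in zip(starts, starts[1:])}
--     spans.add((starts[-1], n - 1, remove_bio(last_tag)))
--     return spans
-- ===== Notes on version B (the rewrite author's own statement) =====
-- stated objective: alternative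
-- what changed: B replaces A's stateful single loop (carrying start_span/current_tag and emitting a span at each boundary) by two stateless passes: first collect all segment-start positions with a filtered range comprehension, then build every span from consecutive pairs of starts via zip.
import Mathlib
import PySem

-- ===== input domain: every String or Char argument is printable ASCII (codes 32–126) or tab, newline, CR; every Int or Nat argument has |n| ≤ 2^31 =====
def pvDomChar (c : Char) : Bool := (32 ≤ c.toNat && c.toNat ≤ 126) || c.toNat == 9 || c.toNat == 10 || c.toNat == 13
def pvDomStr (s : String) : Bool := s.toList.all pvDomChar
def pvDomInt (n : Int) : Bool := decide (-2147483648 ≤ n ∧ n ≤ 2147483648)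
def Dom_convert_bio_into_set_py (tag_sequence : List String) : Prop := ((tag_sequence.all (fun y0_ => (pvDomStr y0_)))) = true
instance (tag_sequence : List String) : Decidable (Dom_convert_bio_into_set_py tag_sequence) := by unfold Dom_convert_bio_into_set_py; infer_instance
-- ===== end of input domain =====

-- B rebuilds the spans from a list of segment-start positions (filtered range + zip of
-- consecutive starts) instead of A's stateful boundary-emitting loop; same cost, different decomposition.

-- ===== PORT A =====
-- shared helper: both Pythons define the identical nested remove_bio
def removeBio (tag : String) : String :=
  if PySem.Str.startswith tag "B-" || PySem.Str.startswith tag "I-" then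
    PySem.Str.slice tag (some 2) none
  else tag

def convert_bio_into_set_py (tag_sequence : List String) : List (Int × Int × String) :=
  -- spans = set(); start_span = 0; current_tag = tag_sequence[0]
  -- for pos, tag in enumerate(tag_sequence[1:], 1): …
  let fin := (PySem.List.enumerate (PySem.List.slice tag_sequence (some 1) none) 1).foldl
    (fun (st : List (Int × Int × String) × Int × String) (pt : Int × String) =>
      if PySem.Str.startswith pt.2 "B-" ||
         (pt.2 == "O" && !(PySem.List.pyGetD tag_sequence (pt.1 - 1) "" == "O")) then
        (PySem.Set.add st.1 (st.2.1, pt.1 - 1, removeBio st.2.2), pt.1, pt.2)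
      else st)
    (PySem.Set.empty, (0 : Int), PySem.List.pyGetD tag_sequence 0 "")
  PySem.Set.add fin.1 (fin.2.1, (tag_sequence.length : Int) - 1,
    removeBio (PySem.List.pyGetD tag_sequence (-1) ""))

-- ===== PORT B =====
def convert_bio_into_set_py_alt (tag_sequence : List String) : List (Int × Int × String) :=
  let n : Int := (tag_sequence.length : Int)
  let lastTag := PySem.List.pyGetD tag_sequence (-1) ""
  -- starts = [0] + [p for p in range(1, n) if boundary(p)]
  let starts : List Int := 0 :: (PySem.List.pyRange 1 n 1).filter (fun p =>
      PySem.Str.startswith (PySem.List.pyGetD tag_sequence p "") "B-" ||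
      ((PySem.List.pyGetD tag_sequence p "") == "O" &&
        !(PySem.List.pyGetD tag_sequence (p - 1) "" == "O")))
  -- spans = {(s, e-1, remove_bio(tag_sequence[s])) for s, e in zip(starts, starts[1:])}
  let spans := PySem.Set.ofList ((starts.zip (PySem.List.slice starts (some 1) none)).map
      (fun se => (se.1, se.2 - 1, removeBio (PySem.List.pyGetD tag_sequence se.1 ""))))
  -- spans.add((starts[-1], n-1, remove_bio(last_tag)))
  PySem.Set.add spans (PySem.List.pyGetD starts (-1) 0, n - 1, removeBio lastTag)

-- ===== PRECONDITION & SPEC =====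
-- A raises IndexError on the empty list (tag_sequence[0]); excluded.
def Pre_convert_bio_into_set_py (tag_sequence : List String) : Prop := tag_sequence ≠ []
instance (tag_sequence : List String) : Decidable (Pre_convert_bio_into_set_py tag_sequence) := by unfold Pre_convert_bio_into_set_py; infer_instance

def pvWitness_convert_bio_into_set_py : List String := ["B-X", "I-X", "O", "B-Y"]

def Spec_convert_bio_into_set_py (tag_sequence : List String) (out : List (Int × Int × String)) : Prop := out = convert_bio_into_set_py_alt tag_sequence
instance (tag_sequence : List String) (out : List (Int × Int × String)) : Decidable (Spec_convert_bio_into_set_py tag_sequence out) := by unfold Spec_convert_bio_into_set_py; infer_instance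

-- ===== CLAIM (what is proved, stated in full; the proofs are below) =====
def Claim_equal_convert_bio_into_set_py : Prop := ∀ (tag_sequence : List String), Dom_convert_bio_into_set_py tag_sequence → Pre_convert_bio_into_set_py tag_sequence → Spec_convert_bio_into_set_py tag_sequence (convert_bio_into_set_py tag_sequence)

-- ===== LEMMAS AND PROOFS =====

-- enumerate(t, |pre|) pairs each position with its element of pre ++ t, as a mapped range
theorem enum_shift (d : String) (t : List String) : ∀ (pre : List String),
    PySem.List.enumerate t (pre.length : Int) =
    (PySem.List.pyRange (pre.length : Int) ((pre.length : Int) + t.length) 1).map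
      (fun j => (j, PySem.List.pyGetD (pre ++ t) j d)) := by
  induction t with
  | nil => intro pre; simp [PySem.List.enumerate_nil, PySem.List.pyRange_one_eq_nil]
  | cons y t ih =>
    intro pre
    rw [PySem.List.enumerate_cons,
        PySem.List.pyRange_one_cons (by simp only [List.length_cons]; push_cast; omega)]
    have h1 : ((pre.length : Int) + 1) = ((pre ++ [y]).length : Int) := by simp
    have h2 : PySem.List.enumerate t ((pre.length : Int) + 1) =
        (PySem.List.pyRange ((pre.length : Int) + 1) (((pre.length : Int) + 1) + t.length) 1).map
          (fun j => (j, PySem.List.pyGetD ((pre ++ [y]) ++ t) j d)) := by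
      rw [h1]; exact ih (pre ++ [y])
    have hb : ((pre.length : Int) + 1) + (t.length : Int) =
        (pre.length : Int) + ((y :: t).length : Int) := by
      simp only [List.length_cons]; push_cast; ring
    have hlist : (pre ++ [y]) ++ t = pre ++ y :: t := by simp
    rw [List.map_cons, h2, hb, hlist]
    have hhead : PySem.List.pyGetD (pre ++ y :: t) (pre.length : Int) d = y := by
      rw [PySem.List.pyGetD_natCast]
      simp [List.getD]
    rw [hhead]

-- the loop, generically: tags looked up through g, boundaries through b
theorem loop_eq (g : Int → String) (b : Int → Bool) :
    ∀ (L : List Int) (spans : List (Int × Int × String)) (s0 : Int),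
    L.foldl (fun (st : List (Int × Int × String) × Int × String) (j : Int) =>
        if b j then (PySem.Set.add st.1 (st.2.1, j - 1, removeBio st.2.2), j, g j) else st)
      (spans, s0, g s0)
    = (PySem.Set.update spans
         (((s0 :: L.filter b).zip (L.filter b)).map
           (fun se => (se.1, se.2 - 1, removeBio (g se.1)))),
       (L.filter b).getLastD s0, g ((L.filter b).getLastD s0)) := by
  intro L
  induction L with
  | nil => intro spans s0; simp [PySem.Set.update]
  | cons j L ih =>
    intro spans s0
    by_cases hb : b j
    · simp only [List.foldl_cons, hb, if_pos, List.filter_cons_of_pos hb]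
      rw [ih (PySem.Set.add spans (s0, j - 1, removeBio (g s0))) j]
      simp only [List.zip_cons_cons, List.map_cons, List.getLastD_cons,
        PySem.Set.update, List.foldl_cons]
    · simp only [List.foldl_cons, hb, List.filter_cons_of_neg hb]
      exact ih spans s0

theorem getLast_cons_eq_getLastD (l : List Int) : ∀ (x : Int) (h : x :: l ≠ []),
    (x :: l).getLast h = l.getLastD x := by
  induction l with
  | nil => intro x h; simp
  | cons y l ih =>
    intro x h
    rw [List.getLast_cons (by simp), List.getLastD_cons]
    exact ih y (by simp)

theorem pyGetD_neg_one_cons (x : Int) (l : List Int) :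
    PySem.List.pyGetD (x :: l) (-1) 0 = l.getLastD x :=
  (PySem.List.pyGetD_neg_one (x :: l) 0 (by simp)).trans
    (getLast_cons_eq_getLastD l x (by simp))

-- ===== VERDICT (by name: the statement is the Claim_ definition above) =====
theorem convert_bio_into_set_py_spec : Claim_equal_convert_bio_into_set_py := by
  intro xs _ hpre
  unfold Spec_convert_bio_into_set_py
  obtain ⟨x, t, rfl⟩ : ∃ x t, xs = x :: t := by
    cases xs with
    | nil => exact absurd rfl hpre
    | cons x t => exact ⟨x, t, rfl⟩
  unfold convert_bio_into_set_py convert_bio_into_set_py_alt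
  have henum : PySem.List.enumerate (PySem.List.slice (x :: t) (some 1) none) 1 =
      (PySem.List.pyRange 1 ((x :: t).length : Int) 1).map
        (fun j => (j, PySem.List.pyGetD (x :: t) j "")) := by
    rw [PySem.List.slice_from_one, List.tail_cons]
    have h := enum_shift "" t [x]
    norm_num at h
    rw [h]
    congr 2
    simp only [List.length_cons]
    push_cast; ring
  rw [henum, List.foldl_map]
  have h0 : PySem.List.pyGetD (x :: t) 0 "" = (fun j => PySem.List.pyGetD (x :: t) j "") 0 := rfl
  rw [h0]
  rw [loop_eq (fun j => PySem.List.pyGetD (x :: t) j "")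
      (fun j => PySem.Str.startswith (PySem.List.pyGetD (x :: t) j "") "B-" ||
        ((PySem.List.pyGetD (x :: t) j "") == "O" &&
          !(PySem.List.pyGetD (x :: t) (j - 1) "" == "O")))
      (PySem.List.pyRange 1 ((x :: t).length : Int) 1) PySem.Set.empty 0]
  simp only [PySem.List.slice_from_one, List.tail_cons, pyGetD_neg_one_cons]
  rfl
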